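-- pv_equiv track=rewrite | github.com/eternalcreature/Game-Pass-Database | utils/json_maker.py | group_skus_by_platform
-- ===== SOURCE A (Python) =====
-- from typing import Dict, List, Optional
-- from collections import defaultdict
--
-- def group_skus_by_platform(sku_platforms: Dict[str, List[str]]) -> List[List[str]]:
--     """
--     Group Xbox product IDs (SKUs) into clusters based on identical platform sets,
--     ignoring xCloud availability.
--     """
--     groups: Dict[frozenset[str], List[str]] = defaultdict(list)
--
--     for sku, platforms in sku_platforms.items():
--         key = frozenset(p.lower() for p in platforms if p.lower() != "xcloud")
--         groups[key].append(sku)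
--
--     sorted_groups = [
--         sorted(group)
--         for _, group in sorted(groups.items(), key=lambda x: sorted(x[1])[0])
--     ]
--     return sorted_groups
-- ===== SOURCE B (Python) =====
-- def group_skus_by_platform(sku_platforms):
--     """Sort-and-scan instead of hash grouping: decorate each SKU with its sorted
--     normalized platform list, sort the pairs once, split the sorted list into runs
--     of equal platform lists (each run is a finished, already-sorted group), and
--     finally sort the groups (lexicographic = by their smallest SKU)."""
--     decorated = sorted(
--         (sorted({p.lower() for p in platforms if p.lower() != "xcloud"}), sku)
--         for sku, platforms in sku_platforms.items()
--     )
--     runs = []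
--     for norm, sku in decorated:
--         if runs and runs[-1][0] == norm:
--             runs[-1][1].append(sku)
--         else:
--             runs.append((norm, [sku]))
--     return sorted(members for _, members in runs)
-- ===== Notes on version B (the rewrite author's own statement) =====
-- stated objective: alternative
-- what changed: A groups via a defaultdict keyed by frozensets and then sorts every group plus a final sort of the groups by their minimum SKU; B uses no dict and no frozenset: it decorates each SKU with its sorted normalized platform list, sorts the (platform-list, sku) pairs once, splits the sorted list into runs of equal platform lists (each run is a finished, internally sorted group), and sorts the resulting group lists.
import Mathlib
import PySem

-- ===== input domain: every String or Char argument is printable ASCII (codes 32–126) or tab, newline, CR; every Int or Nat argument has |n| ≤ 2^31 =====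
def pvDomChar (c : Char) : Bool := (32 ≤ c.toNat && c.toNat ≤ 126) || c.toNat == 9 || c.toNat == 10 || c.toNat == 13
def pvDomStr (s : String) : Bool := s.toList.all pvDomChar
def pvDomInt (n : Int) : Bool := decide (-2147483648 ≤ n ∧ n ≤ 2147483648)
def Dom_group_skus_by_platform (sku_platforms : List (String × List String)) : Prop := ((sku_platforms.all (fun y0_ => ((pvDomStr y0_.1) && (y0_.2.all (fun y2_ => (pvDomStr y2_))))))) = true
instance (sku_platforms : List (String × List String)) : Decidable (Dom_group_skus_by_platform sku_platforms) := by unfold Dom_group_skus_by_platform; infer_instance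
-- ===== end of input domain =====

-- B replaces A's dict/frozenset grouping followed by per-group sorts and a sort of the
-- groups by their minimum with sort-and-scan: sort (platform-list, sku) pairs once,
-- split the sorted list into runs of equal platform lists, sort the finished groups
-- (objective: alternative — no dict, no frozenset, no per-group sort).

-- ===== PORT A =====
-- Both Pythons receive a dict; the assoc-list argument is read with Python dict
-- construction semantics (first-occurrence key order, last value wins): dict(pairs).items().
def pvItems (xs : List (String × List String)) : List (String × List String) :=
  (xs.foldl (fun d p => d.insert p.1 p.2) PySem.Dict.empty).items

-- A's frozenset(p.lower() for p in platforms if p.lower() != "xcloud"), represented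
-- canonically as its sorted list of distinct elements (equality-exact for frozenset).
-- In B the very same value arises literally as sorted({p.lower() for p in platforms if ...}).
def pvKey (ps : List String) : List String :=
  PySem.List.sorted (PySem.Set.ofList ((ps.map PySem.Str.lower).filter (fun q => !(q == "xcloud")))) (fun x => x) false

def group_skus_by_platform (sku_platforms : List (String × List String)) : List (List String) :=
  let groups : PySem.Dict (List String) (List String) :=
    (pvItems sku_platforms).foldl
      (fun g p => g.modify (pvKey p.2) [] (fun l => l ++ [p.1])) PySem.Dict.empty
  -- sort key sorted(x[1])[0]: every group is nonempty, so [0] is total there; headI is that element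
  (PySem.List.sorted groups.items (fun kv => (PySem.List.sorted kv.2 (fun s => s) false).headI) false).map
    (fun kv => PySem.List.sorted kv.2 (fun s => s) false)

-- ===== PORT B =====
-- the run-splitting loop 'if runs and runs[-1][0] == norm: runs[-1][1].append(sku)
-- else: runs.append((norm, [sku]))' as the obvious structural recursion (merging the
-- head pair into the first run of the rest = appending to the last run so far)
def pvRuns : List (List String × String) → List (List String × List String)
  | [] => []
  | (k, s) :: t =>
    match pvRuns t with
    | (k', g) :: r => if k' == k then (k, s :: g) :: r else (k, [s]) :: (k', g) :: r
    | [] => [(k, [s])]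

def group_skus_by_platform_alt (sku_platforms : List (String × List String)) : List (List String) :=
  -- sorted(( sorted({...}), sku ) for sku, platforms in items()): a sort of tuples = sorted2 on (fst, snd)
  let decorated := PySem.List.sorted2 ((pvItems sku_platforms).map (fun p => (pvKey p.2, p.1)))
    (fun kv => kv.1) (fun kv => kv.2) false
  PySem.List.sorted ((pvRuns decorated).map (fun g => g.2)) (fun x => x) false

-- ===== PRECONDITION & SPEC =====
def Spec_group_skus_by_platform (sku_platforms : List (String × List String)) (out : List (List String)) : Prop := out = group_skus_by_platform_alt sku_platforms
instance (sku_platforms : List (String × List String)) (out : List (List String)) : Decidable (Spec_group_skus_by_platform sku_platforms out) := by unfold Spec_group_skus_by_platform; infer_instance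

-- ===== CLAIM (what is proved, stated in full; the proofs are below) =====
def Claim_equal_group_skus_by_platform : Prop := ∀ (sku_platforms : List (String × List String)), Dom_group_skus_by_platform sku_platforms → Spec_group_skus_by_platform sku_platforms (group_skus_by_platform sku_platforms)

-- ===== LEMMAS AND PROOFS =====

-- proof-only abbreviations: the grouping dict and the group of a key
def pvGrp (k : List String) (l : List (String × List String)) : List String :=
  (l.filter (fun p => pvKey p.2 == k)).map (fun p => p.1)

def pvG (l : List (String × List String)) : PySem.Dict (List String) (List String) :=
  l.foldl (fun g p => g.modify (pvKey p.2) [] (fun l => l ++ [p.1])) PySem.Dict.empty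

theorem pvG_getD (l : List (String × List String)) (k : List String) :
    (pvG l).getD k [] = pvGrp k l := by
  have h : pvG l = (l.map (fun p => (pvKey p.2, p.1))).foldl
      (fun d p => d.modify p.1 [] (fun w => w ++ [p.2])) PySem.Dict.empty := by
    rw [List.foldl_map]
    rfl
  rw [h, PySem.Dict.getD_foldl_modify_append, List.filter_map, List.map_map]
  simp [pvGrp, Function.comp_def]

theorem pvG_keys (l : List (String × List String)) :
    (pvG l).keys = PySem.Set.ofList (l.map (fun p => pvKey p.2)) := by
  rw [pvG, PySem.Dict.keys_foldl_modify_key l (fun p => pvKey p.2) [] (fun _ p => fun w => w ++ [p.1])]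
  simp [PySem.Set.update, PySem.Set.ofList_eq_foldl, PySem.Dict.keys_empty]

theorem pvG_keys_nodup (l : List (String × List String)) : (pvG l).keys.Nodup :=
  PySem.Dict.nodup_keys_foldl_modify_key l (fun p => pvKey p.2) [] (fun _ p => fun w => w ++ [p.1])
    PySem.Dict.empty (by simp [PySem.Dict.keys_empty])

theorem pvItems_fst_nodup (xs : List (String × List String)) :
    ((pvItems xs).map (fun p => p.1)).Nodup := by
  have h := PySem.Dict.nodup_keys_foldl_insert_key xs (fun p => p.1) (fun _ p => p.2)
    PySem.Dict.empty (by simp [PySem.Dict.keys_empty])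
  simpa [PySem.Dict.keys, pvItems] using h

-- a Set built from a cons: the head, then the rest's set without the head
theorem ofList_cons_aux {α : Type} [BEq α] [LawfulBEq α] (r : List α) : ∀ (s : PySem.Set α),
    r.foldl PySem.Set.add s = s ++ (r.foldl PySem.Set.add PySem.Set.empty).filter (fun x => !s.contains x) := by
  induction r with
  | nil => intro s; simp [PySem.Set.empty]
  | cons y r ih =>
    intro s
    rw [List.foldl_cons, List.foldl_cons, ih (PySem.Set.add s y), ih (PySem.Set.add PySem.Set.empty y)]
    have hadde : PySem.Set.add PySem.Set.empty y = [y] := by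
      simp [PySem.Set.add, PySem.Set.empty, PySem.Set.contains]
    rw [hadde]
    by_cases hy : y ∈ s
    · have hadd : PySem.Set.add s y = s := by simp [PySem.Set.add, PySem.Set.contains, hy]
      rw [hadd]
      simp only [List.filter_append, List.filter_filter]
      congr 1
      have h1 : List.filter (fun x => !s.contains x) [y] = [] := by
        simp [PySem.Set.contains, hy]
      rw [h1, List.nil_append]
      apply List.filter_congr
      intro x _
      by_cases hxy : x = y
      · subst hxy; simp [PySem.Set.contains, hy]
      · simp [PySem.Set.contains, hxy]
    · have hadd : PySem.Set.add s y = s ++ [y] := by simp [PySem.Set.add, PySem.Set.contains, hy]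
      rw [hadd]
      simp only [List.filter_append, List.filter_filter, List.append_assoc]
      have h1 : List.filter (fun x => !s.contains x) [y] = [y] := by
        simp [PySem.Set.contains, hy]
      rw [h1]
      congr 2
      apply List.filter_congr
      intro x _
      simp [PySem.Set.contains]
      by_cases hxs : x ∈ s <;> by_cases hxy : x = y <;> simp [hxs, hxy]

theorem ofList_cons {α : Type} [BEq α] [LawfulBEq α] (a : α) (r : List α) :
    PySem.Set.ofList (a :: r) = a :: (PySem.Set.ofList r).filter (fun x => !(x == a)) := by
  rw [PySem.Set.ofList_eq_foldl, PySem.Set.ofList_eq_foldl, List.foldl_cons]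
  have hadd : PySem.Set.add [] a = [a] := by simp [PySem.Set.add, PySem.Set.contains]
  rw [hadd]
  rw [ofList_cons_aux r ([a] : PySem.Set α)]
  simp only [List.cons_append, List.nil_append, PySem.Set.empty]
  congr 1
  apply List.filter_congr
  intro x _
  simp [PySem.Set.contains, eq_comm]

-- sorting a group of the unsorted items = the group of the SKU-sorted items
theorem grp_sorted (its : List (String × List String)) (h : ((its.map (fun p => p.1)).Nodup)) (k : List String) :
    PySem.List.sorted (pvGrp k its) (fun x => x) false = pvGrp k (PySem.List.sorted its (fun kv => kv.1) false) := by
  set s := PySem.List.sorted its (fun kv => kv.1) false with hs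
  apply PySem.List.sorted_eq_of_perm_of_pairwise_lt
  · exact ((PySem.List.sorted_perm its (fun kv => kv.1) false).filter _).map _
  · have hle : s.Pairwise (fun a b => a.1 ≤ b.1) := PySem.List.sorted_pairwise its (fun kv => kv.1)
    have hnd : (s.map (fun p => p.1)).Nodup :=
      (((PySem.List.sorted_perm its (fun kv => kv.1) false).map _).nodup_iff).2 h
    have hlt : s.Pairwise (fun a b => a.1 < b.1) :=
      (hle.and (List.pairwise_map.1 hnd)).imp (fun hab => lt_of_le_of_ne hab.1 hab.2)
    exact List.pairwise_map.2 ((hlt.filter _).imp (fun hab => hab))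

theorem pvGrp_cons_self (x : String × List String) (t : List (String × List String)) :
    pvGrp (pvKey x.2) (x :: t) = x.1 :: pvGrp (pvKey x.2) t := by
  simp [pvGrp]

theorem pvGrp_cons_ne (x : String × List String) (t : List (String × List String)) (k : List String)
    (hk : k ≠ pvKey x.2) : pvGrp k (x :: t) = pvGrp k t := by
  simp [pvGrp, Ne.symm hk]

-- heads of the groups are strictly increasing along the first-occurrence key order of a fst-sorted list
theorem grp_head_lt (l : List (String × List String)) (h : l.Pairwise (fun a b => a.1 < b.1)) :
    (PySem.Set.ofList (l.map (fun p => pvKey p.2))).Pairwise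
      (fun k k' => (pvGrp k l).headI < (pvGrp k' l).headI) := by
  induction l with
  | nil => simp [PySem.Set.ofList]
  | cons x t ih =>
    rw [List.map_cons, ofList_cons]
    have hpt := List.pairwise_cons.1 h
    constructor
    · intro k' hk'
      have hk'm := List.mem_filter.1 hk'
      have hk'ne : k' ≠ pvKey x.2 := by simpa using hk'm.2
      have hk'in : k' ∈ t.map (fun p => pvKey p.2) := (PySem.Set.mem_ofList _ _).1 hk'm.1
      rw [pvGrp_cons_self, pvGrp_cons_ne x t k' hk'ne]
      have hne : pvGrp k' t ≠ [] := by
        obtain ⟨p, hp, hpk⟩ := List.mem_map.1 hk'in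
        intro hnil
        have : p.1 ∈ pvGrp k' t := by
          simp only [pvGrp, List.mem_map]
          exact ⟨p, List.mem_filter.2 ⟨hp, by simp [hpk]⟩, rfl⟩
        simp [hnil] at this
      have hmem : (pvGrp k' t).headI ∈ pvGrp k' t := by
        obtain ⟨c, cs, hc⟩ := List.exists_cons_of_ne_nil hne
        simp [hc]
      obtain ⟨q, hq, hq1⟩ := List.mem_map.1 hmem
      have hqt : q ∈ t := (List.mem_filter.1 hq).1
      simpa [hq1] using hpt.1 q hqt
    · have hrest := (ih hpt.2).sublist (List.filter_sublist
        (p := fun k => !(k == pvKey x.2)) (l := PySem.Set.ofList (t.map (fun p => pvKey p.2))))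
      apply hrest.imp_of_mem
      intro k k' hk hk'
      have hkne : k ≠ pvKey x.2 := by simpa using (List.mem_filter.1 hk).2
      have hk'ne : k' ≠ pvKey x.2 := by simpa using (List.mem_filter.1 hk').2
      rw [pvGrp_cons_ne x t k hkne, pvGrp_cons_ne x t k' hk'ne]
      exact id

theorem sorted_fst_lt (its : List (String × List String)) (h : ((its.map (fun p => p.1)).Nodup)) :
    (PySem.List.sorted its (fun kv => kv.1) false).Pairwise (fun a b => a.1 < b.1) := by
  have hle := PySem.List.sorted_pairwise its (fun kv => kv.1)
  have hnd : ((PySem.List.sorted its (fun kv => kv.1) false).map (fun p => p.1)).Nodup :=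
    (((PySem.List.sorted_perm its (fun kv => kv.1) false).map _).nodup_iff).2 h
  exact (hle.and (List.pairwise_map.1 hnd)).imp (fun hab => lt_of_le_of_ne hab.1 hab.2)

-- every key present in the set of keys has a nonempty group
theorem pvGrp_ne_nil (l : List (String × List String)) (k : List String)
    (hk : k ∈ PySem.Set.ofList (l.map (fun p => pvKey p.2))) : pvGrp k l ≠ [] := by
  have hk' : k ∈ l.map (fun p => pvKey p.2) := (PySem.Set.mem_ofList _ _).1 hk
  obtain ⟨p, hp, hpk⟩ := List.mem_map.1 hk'
  intro hnil
  have : p.1 ∈ pvGrp k l := by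
    simp only [pvGrp, List.mem_map]
    exact ⟨p, List.mem_filter.2 ⟨hp, by simp [hpk]⟩, rfl⟩
  simp [hnil] at this

-- sorting does not depend on which (propositionally equal) LT/Decidable instances were elaborated
theorem sorted_inst_congr {α κ : Type} {lt1 lt2 : LT κ}
    (d1 : DecidableRel (@LT.lt κ lt1)) (d2 : DecidableRel (@LT.lt κ lt2))
    (h : ∀ a b : κ, @LT.lt κ lt1 a b ↔ @LT.lt κ lt2 a b)
    (xs : List α) (key : α → κ) :
    @PySem.List.sorted α κ lt1 d1 xs key false = @PySem.List.sorted α κ lt2 d2 xs key false := by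
  have hfun : (fun (a b : α) => @decide _ (d1 (key a) (key b))) =
      (fun a b => @decide _ (d2 (key a) (key b))) := by
    funext a b
    exact decide_eq_decide.2 (h _ _)
  show List.foldl (fun acc x => PySem.List.insertBy (fun a b => @decide _ (d1 (key a) (key b))) x acc) [] xs
    = List.foldl (fun acc x => PySem.List.insertBy (fun a b => @decide _ (d2 (key a) (key b))) x acc) [] xs
  rw [hfun]

theorem sorted2_inst_congr {α κ₁ κ₂ : Type} {l1 l1' : LT κ₁} {l2 l2' : LT κ₂}
    (d1 : DecidableRel (@LT.lt κ₁ l1)) (d1' : DecidableRel (@LT.lt κ₁ l1'))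
    (d2 : DecidableRel (@LT.lt κ₂ l2)) (d2' : DecidableRel (@LT.lt κ₂ l2'))
    (h1 : ∀ a b : κ₁, @LT.lt κ₁ l1 a b ↔ @LT.lt κ₁ l1' a b)
    (h2 : ∀ a b : κ₂, @LT.lt κ₂ l2 a b ↔ @LT.lt κ₂ l2' a b)
    (xs : List α) (k1 : α → κ₁) (k2 : α → κ₂) :
    @PySem.List.sorted2 α κ₁ κ₂ l1 d1 l2 d2 xs k1 k2 false =
    @PySem.List.sorted2 α κ₁ κ₂ l1' d1' l2' d2' xs k1 k2 false := by
  have hfun : (fun (a b : α) => @decide _ (d1 (k1 a) (k1 b)) ||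
        !(@decide _ (d1 (k1 b) (k1 a))) && @decide _ (d2 (k2 a) (k2 b))) =
      (fun a b => @decide _ (d1' (k1 a) (k1 b)) ||
        !(@decide _ (d1' (k1 b) (k1 a))) && @decide _ (d2' (k2 a) (k2 b))) := by
    funext a b
    rw [decide_eq_decide.2 (h1 (k1 a) (k1 b)), decide_eq_decide.2 (h1 (k1 b) (k1 a)),
      decide_eq_decide.2 (h2 (k2 a) (k2 b))]
  show List.foldl (fun acc x => PySem.List.insertBy (fun a b => @decide _ (d1 (k1 a) (k1 b)) ||
      !(@decide _ (d1 (k1 b) (k1 a))) && @decide _ (d2 (k2 a) (k2 b))) x acc) [] xs = _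
  rw [hfun]
  rfl

-- sorted2 is the single-key sort by the lexicographic pair key
theorem sorted2_eq_sorted_lex {α κ₁ κ₂ : Type} [LinearOrder κ₁] [LinearOrder κ₂]
    (xs : List α) (k1 : α → κ₁) (k2 : α → κ₂) :
    PySem.List.sorted2 xs k1 k2 false =
      PySem.List.sorted xs (fun a => toLex (k1 a, k2 a)) false := by
  rw [PySem.List.sorted_eq_foldl_insertBy]
  show List.foldl (fun acc x => PySem.List.insertBy
      (fun a b => decide (k1 a < k1 b) || !decide (k1 b < k1 a) && decide (k2 a < k2 b)) x acc) [] xs = _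
  have hcomp : (fun (a b : α) => decide (k1 a < k1 b) || !decide (k1 b < k1 a) && decide (k2 a < k2 b))
      = (fun a b => decide ((toLex (k1 a, k2 a)) < toLex (k1 b, k2 b))) := by
    funext a b
    rw [Bool.eq_iff_iff]
    simp only [Bool.or_eq_true, Bool.and_eq_true, Bool.not_eq_eq_eq_not, Bool.not_true,
      decide_eq_true_eq, decide_eq_false_iff_not, Prod.Lex.lt_iff]
    constructor
    · rintro (h | ⟨h1, h2⟩)
      · exact Or.inl h
      · rcases lt_trichotomy (k1 a) (k1 b) with h' | h' | h'
        · exact Or.inl h'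
        · exact Or.inr ⟨h', h2⟩
        · exact absurd h' h1
    · rintro (h | ⟨h1, h2⟩)
      · exact Or.inl h
      · exact Or.inr ⟨fun hlt => absurd h1 (ne_of_gt hlt), h2⟩
  rw [hcomp]

-- partitioning a list by its distinct keys is a permutation of it
theorem perm_flatMap_filter {α κ : Type} [BEq κ] [LawfulBEq κ] (key : α → κ) :
    ∀ (ks : List κ) (l : List α), ks.Nodup → (∀ a ∈ l, key a ∈ ks) →
    (ks.flatMap (fun k => l.filter (fun a => key a == k))).Perm l := by
  intro ks
  induction ks with
  | nil =>
    intro l _ hl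
    have : l = [] := List.eq_nil_iff_forall_not_mem.2 (fun a ha => by simpa using hl a ha)
    simp [this]
  | cons k t ih =>
    intro l hnd hl
    rw [List.flatMap_cons]
    have hknt : k ∉ t := (List.nodup_cons.1 hnd).1
    have hrest : ∀ k' ∈ t, l.filter (fun a => key a == k') =
        (l.filter (fun a => !(key a == k))).filter (fun a => key a == k') := by
      intro k' hk'
      rw [List.filter_filter]
      apply List.filter_congr
      intro a _
      by_cases h : key a = k'
      · have hne : k' ≠ k := fun he => hknt (he ▸ hk')
        have hak : key a ≠ k := by rw [h]; exact hne
        simp [h, hne]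
      · simp [h]
    have hflat : t.flatMap (fun k' => l.filter (fun a => key a == k')) =
        t.flatMap (fun k' => (l.filter (fun a => !(key a == k))).filter (fun a => key a == k')) :=
      List.flatMap_congr (fun k' hk' => hrest k' hk')
    rw [hflat]
    have hsub : ∀ a ∈ l.filter (fun a => !(key a == k)), key a ∈ t := by
      intro a ha
      have := List.mem_filter.1 ha
      have hk := hl a this.1
      rcases List.mem_cons.1 hk with h | h
      · exact absurd h (by simpa using this.2)
      · exact h
    exact (List.Perm.append_left _ (ih _ (List.nodup_cons.1 hnd).2 hsub)).trans
      (List.filter_append_perm _ l)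

-- pairwise strict lex order on a flatMap of key-tagged blocks
theorem pairwise_blocks {κ ν : Type} [LinearOrder κ] [LinearOrder ν] (g : κ → List ν) :
    ∀ (ks : List κ), ks.Pairwise (· < ·) → (∀ k ∈ ks, (g k).Pairwise (· < ·)) →
    (ks.flatMap (fun k => (g k).map (fun x => (k, x)))).Pairwise
      (fun a b => a.1 < b.1 ∨ (a.1 = b.1 ∧ a.2 < b.2)) := by
  intro ks
  induction ks with
  | nil => simp
  | cons k t ih =>
    intro hks hg
    rw [List.flatMap_cons]
    apply List.pairwise_append.2
    refine ⟨?_, ih (List.pairwise_cons.1 hks).2 (fun k' hk' => hg k' (List.mem_cons_of_mem _ hk')), ?_⟩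
    · apply List.pairwise_map.2
      apply ((hg k (List.mem_cons_self)).imp)
      intro a b hab
      exact Or.inr ⟨rfl, hab⟩
    · intro a ha b hb
      obtain ⟨x, _, hax⟩ := List.mem_map.1 ha
      obtain ⟨k', hk', y, _, hby⟩ := by
        simpa [List.mem_flatMap, List.mem_map] using hb
      have hkk' : k < k' := (List.pairwise_cons.1 hks).1 k' hk'
      left
      rw [← hax, ← hby]
      exact hkk'

-- pvRuns keeps the key of the first pair as the key of the first run
theorem pvRuns_head_key (l : List (List String × String)) (hl : l ≠ []) :
    (pvRuns l).head?.map Prod.fst = l.head?.map Prod.fst := by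
  induction l with
  | nil => simp at hl
  | cons x t ih =>
    obtain ⟨k, s⟩ := x
    by_cases ht : t = []
    · subst ht; simp [pvRuns]
    · have := ih ht
      simp only [pvRuns]
      rcases hr : pvRuns t with _ | ⟨⟨k', g⟩, r⟩
      · simp
      · rw [hr] at this
        by_cases hkk : k' = k <;> simp [hkk]

-- pvRuns of one uniform-key block in front
theorem pvRuns_block (k : List String) (rest : List (List String × String))
    (hrest : ∀ p ∈ rest.head?, p.1 ≠ k) :
    ∀ (g : List String), g ≠ [] →
    pvRuns (g.map (fun s => (k, s)) ++ rest) = (k, g) :: pvRuns rest := by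
  intro g
  induction g with
  | nil => intro h; simp at h
  | cons s g ih =>
    intro _
    by_cases hg : g = []
    · subst hg
      simp only [List.map_cons, List.map_nil, List.nil_append, List.cons_append, pvRuns]
      rcases hrestc : rest with _ | ⟨p, r⟩
      · simp [pvRuns]
      · have hp : p.1 ≠ k := by
          apply hrest
          simp [hrestc]
        have hhead := pvRuns_head_key rest (by simp [hrestc])
        rcases hr : pvRuns rest with _ | ⟨⟨k', g'⟩, r'⟩
        · rw [hrestc] at hr
          rw [hr]
        · rw [hrestc] at hhead hr
          rw [hr] at hhead ⊢
          simp only [List.head?_cons, Option.map_some] at hhead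
          have hk' : k' = p.1 := by simpa using hhead
          have : (k' == k) = false := by simp [hk', hp]
          simp [this]
    · have hih := ih hg
      show pvRuns ((k, s) :: (List.map (fun s => (k, s)) g ++ rest)) = _
      rw [pvRuns, hih]
      simp

-- pvRuns of a flatMap of nonempty distinct-key blocks
theorem pvRuns_flatMap (g : List String → List String) :
    ∀ (ks : List (List String)), ks.Nodup → (∀ k ∈ ks, g k ≠ []) →
    pvRuns (ks.flatMap (fun k => (g k).map (fun s => (k, s)))) = ks.map (fun k => (k, g k)) := by
  intro ks
  induction ks with
  | nil => intro _ _; rfl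
  | cons k t ih =>
    intro hnd hg
    rw [List.flatMap_cons]
    have hhead : ∀ p ∈ (t.flatMap (fun k' => (g k').map (fun s => (k', s)))).head?, p.1 ≠ k := by
      intro p hp
      have hmem : p ∈ t.flatMap (fun k' => (g k').map (fun s => (k', s))) :=
        List.mem_of_mem_head? hp
      obtain ⟨k', hk', hp'⟩ := List.mem_flatMap.1 hmem
      obtain ⟨s, _, hps⟩ := List.mem_map.1 hp'
      intro hpk
      exact (List.nodup_cons.1 hnd).1 (by rw [← hpk, ← hps]; simpa using hk')
    rw [pvRuns_block k _ hhead (g k) (hg k List.mem_cons_self),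
      ih (List.nodup_cons.1 hnd).2 (fun k' hk' => hg k' (List.mem_cons_of_mem _ hk'))]
    rfl

-- nonempty string lists with ordered heads are lexicographically ordered
theorem lt_of_headI_lt (a b : List String) (ha : a ≠ []) (hb : b ≠ [])
    (h : a.headI < b.headI) : a < b := by
  obtain ⟨x, xs, rfl⟩ := List.exists_cons_of_ne_nil ha
  obtain ⟨y, ys, rfl⟩ := List.exists_cons_of_ne_nil hb
  simp only [List.headI_cons] at h
  exact List.Lex.rel h

theorem main_eq (xs : List (String × List String)) :
    group_skus_by_platform xs = group_skus_by_platform_alt xs := by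
  have hnd := pvItems_fst_nodup xs
  set its := pvItems xs with hits
  set s := PySem.List.sorted its (fun kv => kv.1) false with hs
  have hslt : s.Pairwise (fun a b => a.1 < b.1) := sorted_fst_lt its hnd
  have hperm := PySem.List.sorted_perm its (fun kv => kv.1) false
  set K0 := PySem.Set.ofList (s.map (fun p => pvKey p.2)) with hK0
  -- ===== A's side: A xs = K0.map (fun k => pvGrp k s) =====
  have hitems : (pvG its).items =
      (PySem.Set.ofList (its.map (fun p => pvKey p.2))).map (fun k => (k, pvGrp k its)) := by
    rw [PySem.Dict.items_eq_map_keys (pvG its) (pvG_keys_nodup its) [], pvG_keys]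
    simp only [pvG_getD]
  have hKperm : K0.Perm (PySem.Set.ofList (its.map (fun p => pvKey p.2))) := by
    refine (List.perm_ext_iff_of_nodup (PySem.Set.nodup_ofList _) (PySem.Set.nodup_ofList _)).2 ?_
    intro k
    rw [PySem.Set.mem_ofList, PySem.Set.mem_ofList]
    exact ⟨fun hk => (hperm.map _).mem_iff.1 hk, fun hk => (hperm.map _).mem_iff.2 hk⟩
  have hsorted : PySem.List.sorted (pvG its).items
      (fun kv => (PySem.List.sorted kv.2 (fun s => s) false).headI) false =
      K0.map (fun k => (k, pvGrp k its)) := by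
    apply PySem.List.sorted_eq_of_perm_of_pairwise_lt
    · rw [hitems]; exact hKperm.map _
    · apply List.pairwise_map.2
      apply (grp_head_lt s hslt).imp_of_mem
      intro k k' _ _ hr
      simpa [grp_sorted its hnd k, grp_sorted its hnd k'] using hr
  have hA : group_skus_by_platform xs = K0.map (fun k => pvGrp k s) := by
    show (PySem.List.sorted (pvG its).items
        (fun kv => (PySem.List.sorted kv.2 (fun s => s) false).headI) false).map
        (fun kv => PySem.List.sorted kv.2 (fun s => s) false) = _
    rw [hsorted, List.map_map]
    apply List.map_congr_left
    intro k _
    simpa using grp_sorted its hnd k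
  -- ===== B's side =====
  set ks := PySem.List.sorted K0 (fun x => x) false with hks
  have hksperm : ks.Perm K0 := PySem.List.sorted_perm K0 (fun x => x) false
  have hksnd : ks.Nodup := (hksperm.nodup_iff).2 (PySem.Set.nodup_ofList _)
  have hbr1 : PySem.List.sorted (PySem.Set.ofList (s.map (fun p => pvKey p.2))) (fun x : List String => x) false
      = @PySem.List.sorted _ _ List.instLinearOrder.toLT (@LinearOrder.toDecidableLT _ List.instLinearOrder)
        (PySem.Set.ofList (s.map (fun p => pvKey p.2))) (fun x => x) false :=
    sorted_inst_congr _ _ (fun a b => Iff.rfl) _ _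
  have hkslt : ks.Pairwise (fun a b => a < b) := by
    rw [hks, hK0, hbr1]
    exact PySem.List.sorted_ofList_pairwise_lt (List.map (fun p => pvKey p.2) s)
  have hgrp_lt : ∀ k, (pvGrp k s).Pairwise (fun a b => a < b) := by
    intro k
    exact List.pairwise_map.2 ((hslt.filter _).imp (fun hab => hab))
  have hgrp_ne : ∀ k ∈ ks, pvGrp k s ≠ [] := by
    intro k hk
    exact pvGrp_ne_nil s k (hksperm.mem_iff.1 hk)
  set L := ks.flatMap (fun k => (pvGrp k s).map (fun x => (k, x))) with hL
  -- the decorated, pair-sorted list is exactly L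
  have hdec : PySem.List.sorted2 (its.map (fun p => (pvKey p.2, p.1)))
      (fun kv => kv.1) (fun kv => kv.2) false = L := by
    refine Eq.trans (sorted2_inst_congr _ (@LinearOrder.toDecidableLT _ List.instLinearOrder)
      _ (@LinearOrder.toDecidableLT _ String.instLinearOrder)
      (fun a b => Iff.rfl) (fun a b => Iff.rfl) _ _ _) ?_
    rw [sorted2_eq_sorted_lex (its.map (fun p => (pvKey p.2, p.1))) (fun kv => kv.1) (fun kv => kv.2)]
    -- L is a permutation of the decorated list
    have hblock : ∀ k, (pvGrp k s).map (fun x => (k, x)) =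
        (s.map (fun p => (pvKey p.2, p.1))).filter (fun q => q.1 == k) := by
      intro k
      rw [List.filter_map]
      simp only [pvGrp, List.map_map]
      apply List.map_congr_left
      intro p hp
      have := (List.mem_filter.1 hp).2
      simp only [Function.comp_def]
      simp only [beq_iff_eq] at this
      simp [this]
    have hcover : ∀ q ∈ s.map (fun p => (pvKey p.2, p.1)), q.1 ∈ ks := by
      intro q hq
      obtain ⟨p, hp, hpq⟩ := List.mem_map.1 hq
      apply hksperm.mem_iff.2
      apply (PySem.Set.mem_ofList _ _).2
      exact List.mem_map.2 ⟨p, hp, by rw [← hpq]⟩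
    have hLperm : L.Perm (its.map (fun p => (pvKey p.2, p.1))) := by
      rw [hL]
      have hpf := perm_flatMap_filter (Prod.fst) ks (s.map (fun p => (pvKey p.2, p.1))) hksnd hcover
      have hcongr : ks.flatMap (fun k => (pvGrp k s).map (fun x => (k, x))) =
          ks.flatMap (fun k => (s.map (fun p => (pvKey p.2, p.1))).filter (fun q => q.1 == k)) :=
        List.flatMap_congr (fun k _ => hblock k)
      rw [hcongr]
      exact hpf.trans (hperm.map _)
    have hLpair : L.Pairwise (fun a b => (fun kv => toLex (kv.1, kv.2)) a < (fun kv => toLex (kv.1, kv.2)) b) := by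
      have hpb := pairwise_blocks (fun k => pvGrp k s) ks hkslt (fun k _ => hgrp_lt k)
      apply hpb.imp
      intro a b hab
      rw [Prod.Lex.lt_iff]
      simpa using hab
    exact PySem.List.sorted_eq_of_perm_of_pairwise_lt _ L _ hLperm hLpair
  have hB : group_skus_by_platform_alt xs = PySem.List.sorted (ks.map (fun k => pvGrp k s)) (fun x => x) false := by
    show PySem.List.sorted ((pvRuns (PySem.List.sorted2 (its.map (fun p => (pvKey p.2, p.1)))
        (fun kv => kv.1) (fun kv => kv.2) false)).map (fun g => g.2)) (fun x => x) false = _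
    rw [hdec, hL, pvRuns_flatMap (fun k => pvGrp k s) ks hksnd hgrp_ne, List.map_map]
    rfl
  -- ===== the final sort of B's groups is A's list =====
  rw [hA, hB]
  have hpermF : (K0.map (fun k => pvGrp k s)).Perm (ks.map (fun k => pvGrp k s)) :=
    (hksperm.map _).symm
  have hpairA : (K0.map (fun k => pvGrp k s)).Pairwise (fun a b => a < b) := by
    apply List.pairwise_map.2
    apply (grp_head_lt s hslt).imp_of_mem
    intro k k' hk hk' hr
    exact lt_of_headI_lt _ _ (pvGrp_ne_nil s k hk) (pvGrp_ne_nil s k' hk') hr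
  have hbr2 : PySem.List.sorted (ks.map (fun k => pvGrp k s)) (fun x : List String => x) false
      = @PySem.List.sorted _ _ List.instLinearOrder.toLT (@LinearOrder.toDecidableLT _ List.instLinearOrder)
        (ks.map (fun k => pvGrp k s)) (fun x => x) false :=
    sorted_inst_congr _ _ (fun a b => Iff.rfl) _ _
  rw [hbr2]
  exact (PySem.List.sorted_eq_of_perm_of_pairwise_lt (ks.map (fun k => pvGrp k s))
    (K0.map (fun k => pvGrp k s)) (fun x => x) hpermF hpairA).symm

-- ===== VERDICT (by name: the statement is the Claim_ definition above) =====
theorem group_skus_by_platform_spec : Claim_equal_group_skus_by_platform := by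
  intro xs _
  exact main_eq xs
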